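-- pv_equiv track=rewrite | github.com/ThejanB/Project-Euler | 124 method 2.py | rad
-- ===== SOURCE A (Python) =====
-- def rad(n):
--     candidates = [1]*(n+1)
--     candidates[0] = 0
--     for i in range(2,n+1,2):
--         candidates[i] *= 2
--     for i in range(3,n+1,2):
--         if candidates[i] == 1:
--             for j in range(i,n+1,i):
--                 candidates[j] *= i
--     return candidates
-- ===== SOURCE B (Python) =====
-- def rad(n):
--     # Smallest-prime-factor sieve, then each radical from the radical of i // spf[i]:
--     # no multiply-over-multiples passes and no use of the result array as a primality oracle.
--     spf = list(range(n + 1))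
--     for p in range(2, n + 1):
--         if spf[p] == p:
--             for q in range(p * p, n + 1, p):
--                 if spf[q] == q:
--                     spf[q] = p
--     res = [1] * (n + 1)
--     res[0] = 0
--     for i in range(2, n + 1):
--         p = spf[i]
--         j = i // p
--         res[i] = res[j] if j % p == 0 else res[j] * p
--     return res
-- ===== Notes on version B (the rewrite author's own statement) =====
-- stated objective: alternative
-- what changed: Replaces A's multiply-over-multiples sieve (which special-cases the prime 2 and uses the result array itself as a primality oracle) by a smallest-prime-factor sieve followed by a dynamic-programming pass computing each radical from the radical of i // spf[i].
import Mathlib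
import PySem

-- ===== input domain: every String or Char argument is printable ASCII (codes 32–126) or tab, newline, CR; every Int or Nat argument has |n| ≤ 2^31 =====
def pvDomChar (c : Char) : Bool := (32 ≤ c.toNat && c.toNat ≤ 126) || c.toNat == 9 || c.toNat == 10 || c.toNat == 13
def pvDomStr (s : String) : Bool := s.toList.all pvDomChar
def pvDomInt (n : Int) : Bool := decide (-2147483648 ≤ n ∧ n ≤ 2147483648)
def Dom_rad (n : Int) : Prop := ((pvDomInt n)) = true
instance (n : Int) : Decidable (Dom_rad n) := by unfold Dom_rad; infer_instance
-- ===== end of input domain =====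

-- B replaces A's multiply-over-multiples sieve by a smallest-prime-factor sieve plus a
-- DP pass deriving each radical from the radical of i // spf[i] (objective: alternative).

-- ===== PORT A =====
-- candidates[x] *= v  (the update both of A's marking loops perform)
def pvMulAt (v : Int) (c : List Int) (j : Int) : List Int :=
  PySem.List.pySetD c j (PySem.List.pyGetD c j 0 * v)

def rad (n : Int) : List Int :=
  -- candidates = [1]*(n+1); candidates[0] = 0
  let c1 := PySem.List.pySetD (List.replicate (n + 1).toNat (1 : Int)) 0 0
  -- for i in range(2, n+1, 2): candidates[i] *= 2
  let c2 := (PySem.List.pyRange 2 (n + 1) 2).foldl (pvMulAt 2) c1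
  -- for i in range(3, n+1, 2): if candidates[i] == 1: for j in range(i, n+1, i): candidates[j] *= i
  (PySem.List.pyRange 3 (n + 1) 2).foldl
    (fun c i =>
      if PySem.List.pyGetD c i 0 = 1 then
        (PySem.List.pyRange i (n + 1) i).foldl (pvMulAt i) c
      else c) c2

-- ===== PORT B =====
def rad_alt (n : Int) : List Int :=
  -- spf = list(range(n+1)); smallest-prime-factor sieve
  let spf := (PySem.List.pyRange 2 (n + 1) 1).foldl
    (fun spf p =>
      if PySem.List.pyGetD spf p 0 = p then
        (PySem.List.pyRange (p * p) (n + 1) p).foldl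
          (fun spf q => if PySem.List.pyGetD spf q 0 = q then PySem.List.pySetD spf q p else spf)
          spf
      else spf)
    (PySem.List.pyRange 0 (n + 1) 1)
  -- res = [1]*(n+1); res[0] = 0
  let res := PySem.List.pySetD (List.replicate (n + 1).toNat (1 : Int)) 0 0
  -- for i in range(2, n+1): p = spf[i]; j = i // p; res[i] = res[j] if j % p == 0 else res[j] * p
  (PySem.List.pyRange 2 (n + 1) 1).foldl
    (fun res i =>
      let p := PySem.List.pyGetD spf i 0
      let j := PySem.Int.floordiv i p
      PySem.List.pySetD res i
        (if PySem.Int.mod j p == 0 then PySem.List.pyGetD res j 0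
         else PySem.List.pyGetD res j 0 * p))
    res

-- ===== PRECONDITION & SPEC =====
-- Pre_ excludes n < 0, on which A raises IndexError ([1]*(n+1) is empty, candidates[0] = 0 fails).
def Pre_rad (n : Int) : Prop := 0 ≤ n
instance (n : Int) : Decidable (Pre_rad n) := by unfold Pre_rad; infer_instance
def pvWitness_rad : Int := 12

def Spec_rad (n : Int) (out : List Int) : Prop := out = rad_alt n
instance (n : Int) (out : List Int) : Decidable (Spec_rad n out) := by unfold Spec_rad; infer_instance

-- ===== CLAIM (what is proved, stated in full; the proofs are below) =====
def Claim_equal_rad : Prop := ∀ (n : Int), Dom_rad n → Pre_rad n → Spec_rad n (rad n)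
-- ===== LEMMAS AND PROOFS =====

-- reference value: product of those primes among 2..2+K-1 that divide j (0 at j = 0)
def pvC (j p : ℕ) : Bool := decide (Nat.Prime p ∧ p ∣ j)

def pvRef (K j : ℕ) : Int :=
  if j = 0 then 0
  else (((List.range K).filter (fun k => pvC j (2 + k))).map (fun k => ((2 + k : ℕ) : Int))).prod

-- ---- generic pyRange facts (positive step) ----
lemma pyRange_pos_nil (a b s : Int) (hs : 0 < s) (h : b ≤ a) : PySem.List.pyRange a b s = [] := by
  rw [PySem.List.pyRange_of_pos _ _ hs]
  simp [show ¬ a < b by omega]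

lemma pyRange_pos_cons (a b s : Int) (hs : 0 < s) (h : a < b) :
    PySem.List.pyRange a b s = a :: PySem.List.pyRange (a + s) b s := by
  rw [PySem.List.pyRange_of_pos _ _ hs, PySem.List.pyRange_of_pos _ _ hs]
  rw [if_pos h]
  by_cases h2 : a + s < b
  · rw [if_pos h2]
    have he : b - a + s - 1 = (b - (a + s) + s - 1) + 1 * s := by ring
    rw [he, Int.add_mul_ediv_right _ _ (by omega)]
    have hnn : 0 ≤ (b - (a + s) + s - 1) / s := Int.ediv_nonneg (by omega) (by omega)
    have ht : ((b - (a + s) + s - 1) / s + 1).toNat = ((b - (a + s) + s - 1) / s).toNat + 1 := by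
      omega
    rw [ht, List.range_succ_eq_map]
    simp only [List.map_cons, List.map_map]
    congr 1
    · simp
    · apply List.map_congr_left
      intro k _
      simp [Nat.succ_eq_add_one]
      ring
  · rw [if_neg h2]
    have he : (b - a + s - 1) / s = 1 := by
      have h0 : b - a + s - 1 = (b - a - 1) + 1 * s := by ring
      rw [h0, Int.add_mul_ediv_right _ _ (by omega)]
      rw [Int.ediv_eq_zero_of_lt (by omega) (by omega)]
      omega
    rw [he]
    simp

lemma nodup_pyRange_pos (a b s : Int) (hs : 0 < s) : (PySem.List.pyRange a b s).Nodup := by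
  rw [PySem.List.pyRange_of_pos _ _ hs]
  apply List.Nodup.map
  · intro x y hxy
    have : s * (x : Int) = s * (y : Int) := by linarith
    have := mul_left_cancel₀ (show s ≠ 0 by omega) this
    exact_mod_cast this
  · exact List.nodup_range

-- ---- generic fold lemmas ----
lemma foldl_mulAt (v : Int) :
    ∀ (L : List Int) (c : List Int), L.Nodup → (∀ j ∈ L, 0 ≤ j ∧ j < (c.length : Int)) →
      (L.foldl (pvMulAt v) c).length = c.length ∧
      ∀ m : ℕ, PySem.List.pyGetD (L.foldl (pvMulAt v) c) (m : Int) 0 =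
        if (m : Int) ∈ L then PySem.List.pyGetD c (m : Int) 0 * v
        else PySem.List.pyGetD c (m : Int) 0 := by
  intro L
  induction L with
  | nil => intro c _ _; simp
  | cons j t ih =>
    intro c hnd hb
    obtain ⟨hj0, hjlen⟩ := hb j (by simp)
    lift j to ℕ using hj0 with jn
    have hlen' : (pvMulAt v c (jn : Int)).length = c.length := by
      simp [pvMulAt]
    have hnd' := List.nodup_cons.mp hnd
    obtain ⟨hIH1, hIH2⟩ := ih (pvMulAt v c (jn : Int)) hnd'.2 (by
      intro x hx; rw [hlen']; exact hb x (by simp [hx]))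
    rw [List.foldl_cons]
    refine ⟨by rw [hIH1, hlen'], ?_⟩
    intro m
    rw [hIH2 m]
    have hjlt : jn < c.length := by omega
    have hget : ∀ k : ℕ, PySem.List.pyGetD (pvMulAt v c (jn : Int)) (k : Int) 0 =
        if k = jn then PySem.List.pyGetD c (jn : Int) 0 * v
        else PySem.List.pyGetD c (k : Int) 0 := by
      intro k
      simp only [pvMulAt]
      rw [PySem.List.pyGetD_pySetD_natCast c jn k _ _ hjlt]
    by_cases hm : m = jn
    · subst hm
      rw [if_neg (by exact_mod_cast hnd'.1), hget, if_pos rfl,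
        if_pos (by simp)]
    · rw [hget, if_neg hm]
      by_cases hmem : (m : Int) ∈ t
      · rw [if_pos hmem, if_pos (by simp [hmem])]
      · rw [if_neg hmem, if_neg (by
          simp only [List.mem_cons, not_or]
          exact ⟨by exact_mod_cast hm, hmem⟩)]

lemma one_le_prod (L : List Int) (h : ∀ x ∈ L, 1 ≤ x) : 1 ≤ L.prod := by
  induction L with
  | nil => simp
  | cons a t ih =>
    simp only [List.prod_cons]
    have ha : 1 ≤ a := h a (by simp)
    have ht : 1 ≤ t.prod := ih (fun x hx => h x (by simp [hx]))
    nlinarith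

lemma two_le_prod_of_mem (L : List Int) (x : Int) (hx : x ∈ L) (h1 : ∀ y ∈ L, 1 ≤ y)
    (h2 : 2 ≤ x) : 2 ≤ L.prod := by
  induction L with
  | nil => simp at hx
  | cons a t ih =>
    simp only [List.prod_cons]
    rcases List.mem_cons.mp hx with h | h
    · have ht : 1 ≤ t.prod := one_le_prod t (fun y hy => h1 y (by simp [hy]))
      subst h; nlinarith
    · have ha : 1 ≤ a := h1 a (by simp)
      have ht : 2 ≤ t.prod := ih h (fun y hy => h1 y (by simp [hy]))
      nlinarith

-- ---- pvRef facts ----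
lemma pvRef_succ (K j : ℕ) (hj : j ≠ 0) :
    pvRef (K + 1) j = pvRef K j * (if pvC j (2 + K) then ((2 + K : ℕ) : Int) else 1) := by
  simp only [pvRef, if_neg hj, List.range_succ, List.filter_append, List.map_append,
    List.prod_append]
  by_cases h : pvC j (2 + K) <;> simp [h]

lemma pvC_even_false (j p : ℕ) (h2 : 2 ∣ p) (h : p ≠ 2) : pvC j p = false := by
  simp only [pvC, decide_eq_false_iff_not, not_and]
  intro hp
  exact absurd ((Nat.Prime.eq_one_or_self_of_dvd hp 2 h2).resolve_left (by omega)).symm h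

lemma pvRef_prime_eq_one (I : ℕ) (hp : I.Prime) : pvRef (I - 2) I = 1 := by
  have h2 := hp.two_le
  simp only [pvRef, if_neg (by omega : I ≠ 0)]
  have hnil : (List.range (I - 2)).filter (fun k => pvC I (2 + k)) = [] := by
    rw [List.filter_eq_nil_iff]
    intro k hk
    simp only [pvC, decide_eq_true_eq, not_and]
    intro _ hdk
    rcases hp.eq_one_or_self_of_dvd _ hdk with h | h
    · omega
    · have := List.mem_range.mp hk; omega
  rw [hnil]
  simp

lemma pvRef_comp_ne_one (I : ℕ) (h3 : 3 ≤ I) (hnp : ¬ I.Prime) : pvRef (I - 2) I ≠ 1 := by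
  have hI1 : I ≠ 1 := by omega
  have hpp : I.minFac.Prime := Nat.minFac_prime hI1
  have hpd : I.minFac ∣ I := Nat.minFac_dvd I
  have hpI : I.minFac ≠ I := fun h => hnp (h ▸ hpp)
  have hple : I.minFac ≤ I := Nat.le_of_dvd (by omega) hpd
  have h2p : 2 ≤ I.minFac := hpp.two_le
  simp only [pvRef, if_neg (by omega : I ≠ 0)]
  intro hcontra
  have hmem : ((I.minFac : ℕ) : Int) ∈
      (((List.range (I - 2)).filter (fun k => pvC I (2 + k))).map (fun k => ((2 + k : ℕ) : Int))) := by
    apply List.mem_map.mpr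
    refine ⟨I.minFac - 2, ?_, by congr 1; omega⟩
    apply List.mem_filter.mpr
    refine ⟨List.mem_range.mpr (by omega), ?_⟩
    have he : 2 + (I.minFac - 2) = I.minFac := by omega
    rw [he]
    simp [pvC, hpp, hpd]
  have hall : ∀ y ∈ (((List.range (I - 2)).filter (fun k => pvC I (2 + k))).map
      (fun k => ((2 + k : ℕ) : Int))), 1 ≤ y := by
    intro y hy
    obtain ⟨k, _, rfl⟩ := List.mem_map.mp hy
    push_cast
    omega
  have := two_le_prod_of_mem _ _ hmem hall (by exact_mod_cast h2p)
  omega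

-- ---- B side ----
lemma mod_cast_eq_zero (j p : ℕ) (_hp : 0 < p) :
    (PySem.Int.mod (j : Int) (p : Int) == 0) = decide (p ∣ j) := by
  have hm : PySem.Int.mod (j : Int) (p : Int) = (j : Int) % (p : Int) := by
    show Int.fmod _ _ = _
    rw [Int.fmod_eq_emod]
    simp
  rw [hm]
  apply Bool.eq_iff_iff.mpr
  simp only [beq_iff_eq, decide_eq_true_eq]
  constructor
  · intro h
    exact_mod_cast Int.dvd_of_emod_eq_zero h
  · intro h
    exact Int.emod_eq_zero_of_dvd (by exact_mod_cast h)

lemma getD_c1 (n : Int) (m : ℕ) (hm : m < (n + 1).toNat) :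
    PySem.List.pyGetD (PySem.List.pySetD (List.replicate (n + 1).toNat (1 : Int)) 0 0) (m : Int) 0
      = if m = 0 then 0 else 1 := by
  rw [PySem.List.pySetD_of_nonneg _ _ le_rfl, PySem.List.pyGetD_natCast]
  rw [List.getD_eq_getElem _ _ (by simpa using hm)]
  by_cases h : m = 0
  · simp [h]
  · simp [List.getElem_set, List.getElem_replicate, h]
    omega

lemma baseA (n : Int) (hn : 0 ≤ n) :
    ((PySem.List.pyRange 2 (n + 1) 2).foldl (pvMulAt 2)
        (PySem.List.pySetD (List.replicate (n + 1).toNat (1 : Int)) 0 0)).length = (n + 1).toNat ∧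
    ∀ m : ℕ, m < (n + 1).toNat →
      PySem.List.pyGetD ((PySem.List.pyRange 2 (n + 1) 2).foldl (pvMulAt 2)
          (PySem.List.pySetD (List.replicate (n + 1).toNat (1 : Int)) 0 0)) (m : Int) 0
        = pvRef 1 m := by
  have hb : ∀ j ∈ PySem.List.pyRange 2 (n + 1) 2, 0 ≤ j ∧
      j < ((PySem.List.pySetD (List.replicate (n + 1).toNat (1 : Int)) 0 0).length : Int) := by
    intro j hj
    obtain ⟨h1, h2, _⟩ := (PySem.List.mem_pyRange_iff_of_pos (by norm_num) j).mp hj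
    constructor
    · omega
    · rw [PySem.List.length_pySetD]
      simp only [List.length_replicate]
      omega
  obtain ⟨hL, hG⟩ := foldl_mulAt 2 (PySem.List.pyRange 2 (n + 1) 2) _
    (nodup_pyRange_pos _ _ _ (by norm_num)) hb
  refine ⟨by rw [hL, PySem.List.length_pySetD]; simp, ?_⟩
  intro m hm
  rw [hG m, getD_c1 n m hm]
  by_cases hmem : (m : Int) ∈ PySem.List.pyRange 2 (n + 1) 2
  · obtain ⟨h1, h2, h3⟩ := (PySem.List.mem_pyRange_iff_of_pos (by norm_num) _).mp hmem
    have h2m : 2 ∣ m := by omega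
    have hm2 : 2 ≤ m := by omega
    rw [if_pos hmem, if_neg (by omega : ¬ m = 0)]
    have : pvRef 1 m = 2 := by
      rw [pvRef, if_neg (by omega : ¬ m = 0)]
      have : List.range 1 = [0] := rfl
      rw [this]
      simp [pvC, Nat.prime_two, h2m]
    rw [this, one_mul]
  · rw [if_neg hmem]
    by_cases h0 : m = 0
    · simp [h0, pvRef]
    · rw [if_neg h0, pvRef, if_neg h0]
      have hC : pvC m 2 = false := by
        simp only [pvC, decide_eq_false_iff_not, not_and]
        intro _ hd
        apply hmem
        apply (PySem.List.mem_pyRange_iff_of_pos (by norm_num) _).mpr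
        refine ⟨by omega, by omega, by omega⟩
      have : List.range 1 = [0] := rfl
      rw [this]
      simp [hC]

lemma stepA (n : Int) (I : ℕ) (hi3 : 3 ≤ I) (hodd : I % 2 = 1) (hin : (I : Int) ≤ n)
    (c : List Int) (hlen : c.length = (n + 1).toNat)
    (hc : ∀ m : ℕ, m < (n + 1).toNat → PySem.List.pyGetD c (m : Int) 0 = pvRef (I - 2) m) :
    (if PySem.List.pyGetD c (I : Int) 0 = 1 then
        (PySem.List.pyRange (I : Int) (n + 1) (I : Int)).foldl (pvMulAt (I : Int)) c
      else c).length = (n + 1).toNat ∧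
    ∀ m : ℕ, m < (n + 1).toNat →
      PySem.List.pyGetD (if PySem.List.pyGetD c (I : Int) 0 = 1 then
          (PySem.List.pyRange (I : Int) (n + 1) (I : Int)).foldl (pvMulAt (I : Int)) c
        else c) (m : Int) 0 = pvRef I m := by
  have hn0 : 0 ≤ n := by omega
  have hIlt : I < (n + 1).toNat := by omega
  have hci : PySem.List.pyGetD c (I : Int) 0 = pvRef (I - 2) I := hc I hIlt
  have hIpos : (0 : Int) < (I : Int) := by exact_mod_cast (by omega : 0 < I)
  by_cases hp : I.Prime
  · have h1 : PySem.List.pyGetD c (I : Int) 0 = 1 := by rw [hci, pvRef_prime_eq_one I hp]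
    rw [if_pos h1]
    have hb : ∀ j ∈ PySem.List.pyRange (I : Int) (n + 1) (I : Int), 0 ≤ j ∧ j < (c.length : Int) := by
      intro j hj
      obtain ⟨ha, hbb, _⟩ := (PySem.List.mem_pyRange_iff_of_pos hIpos j).mp hj
      constructor
      · omega
      · rw [hlen]; omega
    obtain ⟨hL, hG⟩ := foldl_mulAt (I : Int) (PySem.List.pyRange (I : Int) (n + 1) (I : Int)) c
      (nodup_pyRange_pos _ _ _ hIpos) hb
    refine ⟨by rw [hL, hlen], ?_⟩
    intro m hm
    rw [hG m, hc m hm]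
    have hmemiff : ((m : Int) ∈ PySem.List.pyRange (I : Int) (n + 1) (I : Int)) ↔ (I ∣ m ∧ I ≤ m) := by
      rw [PySem.List.mem_pyRange_iff_of_pos hIpos]
      constructor
      · rintro ⟨ha, hbb, hd⟩
        have hdm : (I : Int) ∣ (m : Int) := by
          have := dvd_add hd (dvd_refl (I : Int))
          simpa using this
        exact ⟨by exact_mod_cast hdm, by exact_mod_cast ha⟩
      · rintro ⟨hd, hle⟩
        refine ⟨by exact_mod_cast hle, by omega, ?_⟩
        have : (I : Int) ∣ (m : Int) := by exact_mod_cast hd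
        exact dvd_sub this (dvd_refl _)
    have hkey : pvRef I m = pvRef (I - 2) m * (if I ∣ m ∧ I ≤ m then (I : Int) else 1) := by
      by_cases h0 : m = 0
      · subst h0
        rw [if_neg (by omega : ¬ (I ∣ 0 ∧ I ≤ 0))]
        simp [pvRef]
      · have e1 : pvRef I m = pvRef ((I - 2) + 1 + 1) m := by congr 1; omega
        rw [e1, pvRef_succ _ _ h0, pvRef_succ _ _ h0]
        have e2 : 2 + (I - 2) = I := by omega
        have e3 : 2 + (I - 2 + 1) = I + 1 := by omega
        rw [e2, e3, pvC_even_false m (I + 1) (by omega) (by omega)]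
        by_cases hd : I ∣ m
        · have hle : I ≤ m := Nat.le_of_dvd (by omega) hd
          simp [pvC, hp, hd, hle]
        · simp [pvC, hd]
    rw [hkey]
    by_cases hmm : I ∣ m ∧ I ≤ m
    · rw [if_pos (hmemiff.mpr hmm), if_pos hmm]
    · rw [if_neg (fun h => hmm (hmemiff.mp h)), if_neg hmm, mul_one]
  · have h1 : PySem.List.pyGetD c (I : Int) 0 ≠ 1 := by
      rw [hci]; exact pvRef_comp_ne_one I hi3 hp
    rw [if_neg h1]
    refine ⟨hlen, ?_⟩
    intro m hm
    rw [hc m hm]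
    by_cases h0 : m = 0
    · subst h0; simp [pvRef]
    · have e1 : pvRef I m = pvRef ((I - 2) + 1 + 1) m := by congr 1; omega
      rw [e1, pvRef_succ _ _ h0, pvRef_succ _ _ h0]
      have e2 : 2 + (I - 2) = I := by omega
      have e3 : 2 + (I - 2 + 1) = I + 1 := by omega
      rw [e2, e3, pvC_even_false m (I + 1) (by omega) (by omega)]
      simp [pvC, hp]

lemma loopA (n : Int) (_hn : 0 ≤ n) :
    ∀ (d : ℕ) (I : ℕ), 3 ≤ I → I % 2 = 1 → n + 1 ≤ (I : Int) + 2 * d →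
    ∀ c : List Int, c.length = (n + 1).toNat →
      (∀ m : ℕ, m < (n + 1).toNat → PySem.List.pyGetD c (m : Int) 0 = pvRef (I - 2) m) →
      ∃ F : ℕ, n + 1 ≤ (F : Int) ∧
        ((PySem.List.pyRange (I : Int) (n + 1) 2).foldl
            (fun c i =>
              if PySem.List.pyGetD c i 0 = 1 then
                (PySem.List.pyRange i (n + 1) i).foldl (pvMulAt i) c
              else c) c).length = (n + 1).toNat ∧
        ∀ m : ℕ, m < (n + 1).toNat →
          PySem.List.pyGetD ((PySem.List.pyRange (I : Int) (n + 1) 2).foldl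
              (fun c i =>
                if PySem.List.pyGetD c i 0 = 1 then
                  (PySem.List.pyRange i (n + 1) i).foldl (pvMulAt i) c
                else c) c) (m : Int) 0 = pvRef (F - 2) m := by
  intro d
  induction d with
  | zero =>
    intro I h3 hodd hle c hlen hc
    rw [pyRange_pos_nil _ _ _ (by norm_num) (by omega)]
    exact ⟨I, by omega, by simpa using hlen, by simpa using hc⟩
  | succ d ih =>
    intro I h3 hodd hle c hlen hc
    by_cases hend : n + 1 ≤ (I : Int)
    · rw [pyRange_pos_nil _ _ _ (by norm_num) hend]
      exact ⟨I, hend, by simpa using hlen, by simpa using hc⟩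
    · have hin : (I : Int) ≤ n := by omega
      rw [pyRange_pos_cons _ _ _ (by norm_num) (by omega), List.foldl_cons]
      obtain ⟨hlen', hc'⟩ := stepA n I h3 hodd hin c hlen hc
      have hcast : (I : Int) + 2 = ((I + 2 : ℕ) : Int) := by push_cast; ring
      rw [hcast]
      exact ih (I + 2) (by omega) (by omega) (by push_cast; push_cast at hle; omega) _ hlen'
        (by intro m hm; rw [show I + 2 - 2 = I by omega]; exact hc' m hm)

-- ---- B side: the mathematical radical ----
def radInt (m : ℕ) : Int := if m = 0 then 0 else ∏ p ∈ m.primeFactors, (p : Int)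

lemma pvRef_eq_filter (m : ℕ) (hm : m ≠ 0) :
    ∀ K, pvRef K m = ∏ p ∈ m.primeFactors.filter (fun p => p < 2 + K), (p : Int) := by
  intro K
  induction K with
  | zero =>
    rw [pvRef, if_neg hm]
    have h1 : m.primeFactors.filter (fun p => p < 2 + 0) = ∅ := by
      apply Finset.filter_eq_empty_iff.mpr
      intro p hp
      have := (Nat.mem_primeFactors.mp hp).1.two_le
      omega
    rw [h1]
    simp
  | succ K ih =>
    rw [pvRef_succ K m hm, ih]
    by_cases hc : pvC m (2 + K) = true
    · obtain ⟨hp, hd⟩ := decide_eq_true_eq.mp hc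
      have hmem : 2 + K ∈ m.primeFactors := Nat.mem_primeFactors.mpr ⟨hp, hd, hm⟩
      have hset : m.primeFactors.filter (fun p => p < 2 + (K + 1)) =
          insert (2 + K) (m.primeFactors.filter (fun p => p < 2 + K)) := by
        ext p
        simp only [Finset.mem_filter, Finset.mem_insert]
        constructor
        · rintro ⟨hpm, hlt⟩
          by_cases hpe : p = 2 + K
          · exact Or.inl hpe
          · exact Or.inr ⟨hpm, by omega⟩
        · rintro (rfl | ⟨hpm, hlt⟩)
          · exact ⟨hmem, by omega⟩
          · exact ⟨hpm, by omega⟩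
      rw [hset, Finset.prod_insert (by simp [Finset.mem_filter])]
      rw [if_pos hc]
      ring
    · have hset : m.primeFactors.filter (fun p => p < 2 + (K + 1)) =
          m.primeFactors.filter (fun p => p < 2 + K) := by
        ext p
        simp only [Finset.mem_filter]
        constructor
        · rintro ⟨hpm, hlt⟩
          refine ⟨hpm, ?_⟩
          by_cases hpe : p = 2 + K
          · exfalso
            apply hc
            subst hpe
            obtain ⟨hp, hd, _⟩ := Nat.mem_primeFactors.mp hpm
            exact decide_eq_true_eq.mpr ⟨hp, hd⟩
          · omega
        · rintro ⟨hpm, hlt⟩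
          exact ⟨hpm, by omega⟩
      rw [hset, if_neg hc, mul_one]

lemma pvRef_eq_radInt (m K : ℕ) (hm : m ≠ 0) (hK : m ≤ K + 1) : pvRef K m = radInt m := by
  rw [pvRef_eq_filter m hm K, radInt, if_neg hm]
  congr 1
  apply Finset.filter_true_of_mem
  intro p hp
  obtain ⟨_, hd, _⟩ := Nat.mem_primeFactors.mp hp
  have := Nat.le_of_dvd (by omega) hd
  omega

lemma floordiv_cast (a b : ℕ) : PySem.Int.floordiv (a : Int) (b : Int) = ((a / b : ℕ) : Int) := by
  show Int.fdiv _ _ = _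
  rw [Int.fdiv_eq_ediv]
  simp

lemma radInt_step (i : ℕ) (h2 : 2 ≤ i) :
    radInt i = if i.minFac ∣ i / i.minFac then radInt (i / i.minFac)
               else radInt (i / i.minFac) * ((i.minFac : ℕ) : Int) := by
  have hi0 : i ≠ 0 := by omega
  have hp : i.minFac.Prime := Nat.minFac_prime (by omega)
  have hd : i.minFac ∣ i := Nat.minFac_dvd i
  have hj0 : i / i.minFac ≠ 0 := by
    intro h
    have := Nat.div_mul_cancel hd
    rw [h] at this
    omega
  have hfac : i.primeFactors = insert i.minFac (i / i.minFac).primeFactors := by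
    have hmul : i.minFac * (i / i.minFac) = i := by
      rw [mul_comm]
      exact Nat.div_mul_cancel hd
    calc i.primeFactors = (i.minFac * (i / i.minFac)).primeFactors := by rw [hmul]
      _ = i.minFac.primeFactors ∪ (i / i.minFac).primeFactors :=
          Nat.primeFactors_mul hp.ne_zero hj0
      _ = insert i.minFac (i / i.minFac).primeFactors := by
          rw [hp.primeFactors, ← Finset.insert_eq]
  by_cases hdj : i.minFac ∣ i / i.minFac
  · rw [if_pos hdj, radInt, radInt, if_neg hi0, if_neg hj0, hfac]
    rw [Finset.insert_eq_self.mpr (Nat.mem_primeFactors.mpr ⟨hp, hdj, hj0⟩)]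
  · rw [if_neg hdj, radInt, radInt, if_neg hi0, if_neg hj0, hfac]
    rw [Finset.prod_insert (by
      intro hmem
      exact hdj (Nat.mem_primeFactors.mp hmem).2.1)]
    ring

lemma getD_spf0 (n : Int) (m : ℕ) (hm : m < (n + 1).toNat) :
    PySem.List.pyGetD (PySem.List.pyRange 0 (n + 1) 1) (m : Int) 0 = (m : Int) := by
  rw [PySem.List.pyGetD_natCast]
  rw [List.getD_eq_getElem _ _ (by
    rw [PySem.List.length_pyRange_one]
    omega)]
  rw [PySem.List.getElem_pyRange_one]
  ring

lemma foldl_condSet (p : Int) :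
    ∀ (L : List Int) (s : List Int), L.Nodup → (∀ j ∈ L, 0 ≤ j ∧ j < (s.length : Int)) →
      (L.foldl (fun s q => if PySem.List.pyGetD s q 0 = q then PySem.List.pySetD s q p else s)
          s).length = s.length ∧
      ∀ m : ℕ,
        PySem.List.pyGetD
          (L.foldl (fun s q => if PySem.List.pyGetD s q 0 = q then PySem.List.pySetD s q p else s)
            s) (m : Int) 0 =
        if (m : Int) ∈ L ∧ PySem.List.pyGetD s (m : Int) 0 = (m : Int) then p
        else PySem.List.pyGetD s (m : Int) 0 := by
  intro L
  induction L with
  | nil => intro s _ _; simp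
  | cons j t ih =>
    intro s hnd hb
    obtain ⟨hj0, hjlen⟩ := hb j (by simp)
    lift j to ℕ using hj0 with jn
    have hnd' := List.nodup_cons.mp hnd
    have hjlt : jn < s.length := by omega
    set s' := if PySem.List.pyGetD s (jn : Int) 0 = (jn : Int) then
        PySem.List.pySetD s (jn : Int) p else s with hs'
    have hlen' : s'.length = s.length := by
      rw [hs']
      split
      · simp
      · rfl
    have hget : ∀ k : ℕ, k ≠ jn → PySem.List.pyGetD s' (k : Int) 0 =
        PySem.List.pyGetD s (k : Int) 0 := by
      intro k hk
      rw [hs']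
      split
      · rw [PySem.List.pyGetD_pySetD_natCast s jn k _ _ hjlt, if_neg hk]
      · rfl
    have hgetj : PySem.List.pyGetD s' (jn : Int) 0 =
        if PySem.List.pyGetD s (jn : Int) 0 = (jn : Int) then p
        else PySem.List.pyGetD s (jn : Int) 0 := by
      rw [hs']
      split
      · rw [PySem.List.pyGetD_pySetD_natCast s jn jn _ _ hjlt, if_pos rfl]
      · rfl
    obtain ⟨hIH1, hIH2⟩ := ih s' hnd'.2 (by
      intro x hx; rw [hlen']; exact hb x (by simp [hx]))
    rw [List.foldl_cons]
    refine ⟨by rw [← hs', hIH1, hlen'], ?_⟩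
    intro m
    rw [← hs', hIH2 m]
    by_cases hm : m = jn
    · subst hm
      rw [if_neg (by
        intro hmem
        exact absurd hmem.1 hnd'.1), hgetj]
      by_cases hc : PySem.List.pyGetD s (m : Int) 0 = (m : Int)
      · rw [if_pos hc, if_pos ⟨by simp, hc⟩]
      · rw [if_neg hc, if_neg (by
          intro hmem
          exact hc hmem.2)]
    · rw [hget m hm]
      by_cases hc : (m : Int) ∈ t ∧ PySem.List.pyGetD s (m : Int) 0 = (m : Int)
      · rw [if_pos hc, if_pos ⟨by simp [hc.1], hc.2⟩]
      · rw [if_neg hc, if_neg (by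
          intro hmem
          apply hc
          refine ⟨?_, hmem.2⟩
          rcases List.mem_cons.mp hmem.1 with h | h
          · exact absurd (by exact_mod_cast h : m = jn) hm
          · exact h)]

lemma sieveStep (n : Int) (P : ℕ) (h2 : 2 ≤ P) (hPn : (P : Int) ≤ n) (s : List Int)
    (hlen : s.length = (n + 1).toNat)
    (hs : ∀ m : ℕ, 2 ≤ m → m < (n + 1).toNat →
      PySem.List.pyGetD s (m : Int) 0 = if m.minFac < P then (m.minFac : Int) else (m : Int)) :
    (if PySem.List.pyGetD s (P : Int) 0 = (P : Int) then
        (PySem.List.pyRange ((P : Int) * (P : Int)) (n + 1) (P : Int)).foldl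
          (fun s q => if PySem.List.pyGetD s q 0 = q then PySem.List.pySetD s q (P : Int) else s) s
      else s).length = (n + 1).toNat ∧
    ∀ m : ℕ, 2 ≤ m → m < (n + 1).toNat →
      PySem.List.pyGetD (if PySem.List.pyGetD s (P : Int) 0 = (P : Int) then
          (PySem.List.pyRange ((P : Int) * (P : Int)) (n + 1) (P : Int)).foldl
            (fun s q => if PySem.List.pyGetD s q 0 = q then PySem.List.pySetD s q (P : Int) else s) s
        else s) (m : Int) 0 =
        if m.minFac < P + 1 then (m.minFac : Int) else (m : Int) := by
  have hNlt : P < (n + 1).toNat := by omega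
  have hsP := hs P h2 hNlt
  by_cases hp : P.Prime
  · have hPfac : P.minFac = P := hp.minFac_eq
    rw [hPfac] at hsP
    have hcond : PySem.List.pyGetD s (P : Int) 0 = (P : Int) := by
      rw [hsP, if_neg (by omega : ¬ P < P)]
    rw [if_pos hcond]
    have hPpos : (0 : Int) < (P : Int) := by exact_mod_cast (by omega : 0 < P)
    have hb : ∀ j ∈ PySem.List.pyRange ((P : Int) * (P : Int)) (n + 1) (P : Int),
        0 ≤ j ∧ j < (s.length : Int) := by
      intro j hj
      obtain ⟨h1', h2', _⟩ := (PySem.List.mem_pyRange_iff_of_pos hPpos j).mp hj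
      have hsq : (0 : Int) ≤ (P : Int) * (P : Int) := by positivity
      constructor
      · omega
      · rw [hlen]; omega
    obtain ⟨hL, hG⟩ := foldl_condSet (P : Int) _ s (nodup_pyRange_pos _ _ _ hPpos) hb
    refine ⟨by rw [hL, hlen], ?_⟩
    intro m h2m hmN
    rw [hG m, hs m h2m hmN]
    have hsqcast : (P : Int) * (P : Int) = ((P * P : ℕ) : Int) := by push_cast; ring
    have h2PP : 2 * P ≤ P * P := Nat.mul_le_mul_right P h2
    have hmemiff : ((m : Int) ∈ PySem.List.pyRange ((P : Int) * (P : Int)) (n + 1) (P : Int)) ↔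
        (P * P ≤ m ∧ P ∣ m) := by
      rw [PySem.List.mem_pyRange_iff_of_pos hPpos]
      constructor
      · rintro ⟨ha, hbb, hd⟩
        have hdm : (P : Int) ∣ (m : Int) := by
          have h1 : (P : Int) ∣ (P : Int) * (P : Int) := Dvd.intro _ rfl
          have := dvd_add hd h1
          simpa using this
        rw [hsqcast] at ha
        exact ⟨by exact_mod_cast ha, by exact_mod_cast hdm⟩
      · rintro ⟨hPP, hd⟩
        have h1 : (P : Int) ∣ (m : Int) := by exact_mod_cast hd
        refine ⟨by rw [hsqcast]; exact_mod_cast hPP, by omega, ?_⟩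
        exact dvd_sub h1 (Dvd.intro _ rfl)
    by_cases hlt : m.minFac < P
    · simp only [if_pos hlt]
      rw [if_pos (by omega : m.minFac < P + 1)]
      rw [if_neg ?_]
      intro ⟨hmem, heq⟩
      have hfm : m.minFac = m := by exact_mod_cast heq
      obtain ⟨hPP, _⟩ := hmemiff.mp hmem
      omega
    · simp only [if_neg hlt]
      by_cases hmem : P * P ≤ m ∧ P ∣ m
      · rw [if_pos ⟨hmemiff.mpr hmem, trivial⟩]
        have hfm : m.minFac = P := le_antisymm (Nat.minFac_le_of_dvd h2 hmem.2) (by omega)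
        rw [if_pos (by omega), hfm]
      · rw [if_neg (fun hcon => hmem (hmemiff.mp hcon.1))]
        by_cases hfin : m.minFac < P + 1
        · have hPf : m.minFac = P := by omega
          have hPdm : P ∣ m := hPf ▸ Nat.minFac_dvd m
          have hmP : m = P := by
            by_contra hne
            have hnp : ¬ m.Prime := by
              intro hpm
              apply hne
              rw [← hpm.minFac_eq, hPf]
            have hsq := Nat.minFac_sq_le_self (by omega : 0 < m) hnp
            rw [hPf, pow_two] at hsq
            exact hmem ⟨hsq, hPdm⟩
          rw [if_pos hfin, hPf, hmP]
        · rw [if_neg hfin]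
  · have hPm : P.minFac < P := by
      have hle := Nat.minFac_le (by omega : 0 < P)
      have hne : P.minFac ≠ P := by
        intro h
        exact hp (Nat.prime_def_minFac.mpr ⟨h2, h⟩)
      omega
    have hcond : PySem.List.pyGetD s (P : Int) 0 ≠ (P : Int) := by
      rw [hsP, if_pos hPm]
      intro h
      have : P.minFac = P := by exact_mod_cast h
      omega
    rw [if_neg hcond]
    refine ⟨hlen, ?_⟩
    intro m h2m hmN
    rw [hs m h2m hmN]
    have hiff : (m.minFac < P + 1) ↔ (m.minFac < P) := by
      constructor
      · intro h
        rcases Nat.lt_or_ge m.minFac P with h' | h'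
        · exact h'
        · exfalso
          have hPf : m.minFac = P := by omega
          exact hp (hPf ▸ Nat.minFac_prime (by omega : m ≠ 1))
      · omega
    by_cases hlt : m.minFac < P
    · rw [if_pos hlt, if_pos (hiff.mpr hlt)]
    · rw [if_neg hlt, if_neg (fun h => hlt (hiff.mp h))]

lemma sieveLoop (n : Int) (_hn : 0 ≤ n) :
    ∀ (d : ℕ) (P : ℕ), 2 ≤ P → n + 1 ≤ (P : Int) + d →
    ∀ s : List Int, s.length = (n + 1).toNat →
      (∀ m : ℕ, 2 ≤ m → m < (n + 1).toNat →
        PySem.List.pyGetD s (m : Int) 0 = if m.minFac < P then (m.minFac : Int) else (m : Int)) →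
      ((PySem.List.pyRange (P : Int) (n + 1) 1).foldl
          (fun spf p =>
            if PySem.List.pyGetD spf p 0 = p then
              (PySem.List.pyRange (p * p) (n + 1) p).foldl
                (fun spf q =>
                  if PySem.List.pyGetD spf q 0 = q then PySem.List.pySetD spf q p else spf)
                spf
            else spf) s).length = (n + 1).toNat ∧
      ∀ m : ℕ, 2 ≤ m → m < (n + 1).toNat →
        PySem.List.pyGetD ((PySem.List.pyRange (P : Int) (n + 1) 1).foldl
            (fun spf p =>
              if PySem.List.pyGetD spf p 0 = p then
                (PySem.List.pyRange (p * p) (n + 1) p).foldl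
                  (fun spf q =>
                    if PySem.List.pyGetD spf q 0 = q then PySem.List.pySetD spf q p else spf)
                  spf
              else spf) s) (m : Int) 0 = (m.minFac : Int) := by
  intro d
  induction d with
  | zero =>
    intro P h2 hle s hlen hs
    rw [pyRange_pos_nil _ _ _ (by norm_num) (by omega)]
    refine ⟨by simpa using hlen, ?_⟩
    intro m h2m hmN
    have h1 := Nat.minFac_le (by omega : 0 < m)
    simp only [List.foldl_nil]
    rw [hs m h2m hmN, if_pos (by omega)]
  | succ d ih =>
    intro P h2 hle s hlen hs
    by_cases hend : n + 1 ≤ (P : Int)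
    · rw [pyRange_pos_nil _ _ _ (by norm_num) hend]
      refine ⟨by simpa using hlen, ?_⟩
      intro m h2m hmN
      have h1 := Nat.minFac_le (by omega : 0 < m)
      simp only [List.foldl_nil]
      rw [hs m h2m hmN, if_pos (by omega)]
    · have hPn : (P : Int) ≤ n := by omega
      rw [pyRange_pos_cons _ _ _ (by norm_num) (by omega), List.foldl_cons]
      obtain ⟨hlen', hs'⟩ := sieveStep n P h2 hPn s hlen hs
      have hcast : (P : Int) + 1 = ((P + 1 : ℕ) : Int) := by push_cast; ring
      rw [hcast]
      exact ih (P + 1) (by omega) (by push_cast at hle ⊢; omega) _ hlen' hs'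

lemma dpLoop (n : Int) (_hn : 0 ≤ n) (spf : List Int)
    (hspf : ∀ m : ℕ, 2 ≤ m → m < (n + 1).toNat →
      PySem.List.pyGetD spf (m : Int) 0 = (m.minFac : Int)) :
    ∀ (d : ℕ) (i : ℕ), 2 ≤ i → n + 1 ≤ (i : Int) + d →
    ∀ res : List Int, res.length = (n + 1).toNat →
      (∀ m : ℕ, m < (n + 1).toNat →
        PySem.List.pyGetD res (m : Int) 0 =
          if m < i then radInt m else if m = 0 then 0 else 1) →
      ((PySem.List.pyRange (i : Int) (n + 1) 1).foldl
          (fun res i =>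
            let p := PySem.List.pyGetD spf i 0
            let j := PySem.Int.floordiv i p
            PySem.List.pySetD res i
              (if PySem.Int.mod j p == 0 then PySem.List.pyGetD res j 0
               else PySem.List.pyGetD res j 0 * p)) res).length = (n + 1).toNat ∧
      ∀ m : ℕ, m < (n + 1).toNat →
        PySem.List.pyGetD ((PySem.List.pyRange (i : Int) (n + 1) 1).foldl
            (fun res i =>
              let p := PySem.List.pyGetD spf i 0
              let j := PySem.Int.floordiv i p
              PySem.List.pySetD res i
                (if PySem.Int.mod j p == 0 then PySem.List.pyGetD res j 0
                 else PySem.List.pyGetD res j 0 * p)) res) (m : Int) 0 = radInt m := by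
  intro d
  induction d with
  | zero =>
    intro i h2 hle res hlen hres
    rw [pyRange_pos_nil _ _ _ (by norm_num) (by omega)]
    refine ⟨by simpa using hlen, ?_⟩
    intro m hmN
    simp only [List.foldl_nil]
    rw [hres m hmN, if_pos (by omega)]
  | succ d ih =>
    intro i h2 hle res hlen hres
    by_cases hend : n + 1 ≤ (i : Int)
    · rw [pyRange_pos_nil _ _ _ (by norm_num) hend]
      refine ⟨by simpa using hlen, ?_⟩
      intro m hmN
      simp only [List.foldl_nil]
      rw [hres m hmN, if_pos (by omega)]
    · have hin : (i : Int) ≤ n := by omega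
      have hiN : i < (n + 1).toNat := by omega
      rw [pyRange_pos_cons _ _ _ (by norm_num) (by omega), List.foldl_cons]
      dsimp only
      have hPp : i.minFac.Prime := Nat.minFac_prime (by omega)
      have h2P : 2 ≤ i.minFac := hPp.two_le
      have hPd : i.minFac ∣ i := Nat.minFac_dvd i
      have hgetspf : PySem.List.pyGetD spf (i : Int) 0 = (i.minFac : Int) := hspf i h2 hiN
      have hj1 : 1 ≤ i / i.minFac := (Nat.one_le_div_iff (by omega)).mpr (Nat.minFac_le (by omega))
      have hjlt : i / i.minFac < i := Nat.div_lt_self (by omega) (by omega)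
      rw [hgetspf, floordiv_cast i i.minFac,
        mod_cast_eq_zero (i / i.minFac) i.minFac (by omega)]
      rw [hres (i / i.minFac) (by omega), if_pos hjlt]
      have hval : (if decide (i.minFac ∣ i / i.minFac) = true then radInt (i / i.minFac)
          else radInt (i / i.minFac) * ((i.minFac : ℕ) : Int)) = radInt i := by
        rw [radInt_step i h2]
        by_cases hd : i.minFac ∣ i / i.minFac <;> simp [hd]
      rw [hval]
      have hlen2 : (PySem.List.pySetD res (i : Int) (radInt i)).length = (n + 1).toNat := by
        simp [hlen]
      have hres2 : ∀ m : ℕ, m < (n + 1).toNat →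
          PySem.List.pyGetD (PySem.List.pySetD res (i : Int) (radInt i)) (m : Int) 0 =
            if m < i + 1 then radInt m else if m = 0 then 0 else 1 := by
        intro m hmN
        rw [PySem.List.pyGetD_pySetD_natCast res i m _ _ (by omega)]
        by_cases hmi : m = i
        · subst hmi
          rw [if_pos rfl, if_pos (by omega)]
        · rw [if_neg hmi, hres m hmN]
          by_cases h : m < i
          · rw [if_pos h, if_pos (by omega)]
          · rw [if_neg h, if_neg (by omega : ¬ m = 0), if_neg (by omega : ¬ m < i + 1)]
      have hcast : (i : Int) + 1 = ((i + 1 : ℕ) : Int) := by push_cast; ring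
      rw [hcast]
      exact ih (i + 1) (by omega) (by push_cast at hle ⊢; omega) _ hlen2 hres2

-- ===== VERDICT (by name: the statement is the Claim_ definition above) =====
theorem rad_spec : Claim_equal_rad := by
  intro n _ hpre
  unfold Pre_rad at hpre
  unfold Spec_rad
  -- A side: the sieve array is pointwise pvRef (F - 2)
  obtain ⟨hL2, hG2⟩ := baseA n hpre
  obtain ⟨F, hF, hLa, hGa⟩ := loopA n hpre (n.toNat + 1) 3 (by norm_num) (by norm_num)
    (by omega) _ hL2 (fun m hm => by rw [hG2 m hm])
  have hrad : rad n = (PySem.List.pyRange ((3 : ℕ) : Int) (n + 1) 2).foldl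
      (fun c i =>
        if PySem.List.pyGetD c i 0 = 1 then
          (PySem.List.pyRange i (n + 1) i).foldl (pvMulAt i) c
        else c)
      ((PySem.List.pyRange 2 (n + 1) 2).foldl (pvMulAt 2)
        (PySem.List.pySetD (List.replicate (n + 1).toNat (1 : Int)) 0 0)) := by
    simp [rad]
  -- B side: the spf array is pointwise minFac
  obtain ⟨hLs, hGs⟩ := sieveLoop n hpre n.toNat 2 (by norm_num)
    (by push_cast; omega) (PySem.List.pyRange 0 (n + 1) 1)
    (by rw [PySem.List.length_pyRange_one]; omega)
    (fun m h2m hm => by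
      rw [getD_spf0 n m hm, if_neg (by
        have := (Nat.minFac_prime (by omega : m ≠ 1)).two_le
        omega)])
  -- B side: the DP pass is pointwise radInt
  obtain ⟨hLb, hGb⟩ := dpLoop n hpre _ hGs n.toNat 2 (by norm_num)
    (by push_cast; omega)
    (PySem.List.pySetD (List.replicate (n + 1).toNat (1 : Int)) 0 0)
    (by simp)
    (fun m hm => by
      rw [getD_c1 n m hm]
      by_cases h0 : m = 0
      · subst h0
        simp [radInt]
      · by_cases h1 : m = 1
        · subst h1
          simp [radInt]
        · rw [if_neg h0, if_neg (by omega : ¬ m < 2)])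
  have halt : rad_alt n = (PySem.List.pyRange ((2 : ℕ) : Int) (n + 1) 1).foldl
      (fun res i =>
        let p := PySem.List.pyGetD ((PySem.List.pyRange ((2 : ℕ) : Int) (n + 1) 1).foldl
          (fun spf p =>
            if PySem.List.pyGetD spf p 0 = p then
              (PySem.List.pyRange (p * p) (n + 1) p).foldl
                (fun spf q =>
                  if PySem.List.pyGetD spf q 0 = q then PySem.List.pySetD spf q p else spf)
                spf
            else spf)
          (PySem.List.pyRange 0 (n + 1) 1)) i 0
        let j := PySem.Int.floordiv i p
        PySem.List.pySetD res i
          (if PySem.Int.mod j p == 0 then PySem.List.pyGetD res j 0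
           else PySem.List.pyGetD res j 0 * p))
      (PySem.List.pySetD (List.replicate (n + 1).toNat (1 : Int)) 0 0) := by
    simp [rad_alt]
  rw [hrad, halt]
  apply List.ext_getElem
  · rw [hLa, hLb]
  · intro m h1 h2
    have hmlt : m < (n + 1).toNat := by rw [← hLa]; exact h1
    have hva := hGa m hmlt
    have hvb := hGb m hmlt
    rw [PySem.List.pyGetD_natCast, List.getD_eq_getElem _ _ h1] at hva
    rw [PySem.List.pyGetD_natCast, List.getD_eq_getElem _ _ h2] at hvb
    rw [hva, hvb]
    rcases Nat.eq_zero_or_pos m with rfl | hm0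
    · simp [pvRef, radInt]
    · exact pvRef_eq_radInt m (F - 2) (by omega) (by omega)
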